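-- pv_equiv track=rewrite | github.com/KAPKEPOT/RAYONIX-CHAIN | rayonix_node/cli/base_commands/base_command.py | _format_uptime
-- ===== SOURCE A (Python) =====
-- def _format_uptime(uptime_value) -> str:
--     """Format uptime in seconds to human readable format"""
--     if isinstance(uptime_value, str) and any(x in uptime_value for x in ['s', 'm', 'h', 'd']):
--         return uptime_value
--
--     try:
--         seconds = int(uptime_value)
--         if seconds < 60:
--             return f"{seconds}s"
--         elif seconds < 3600:
--             return f"{seconds // 60}m {seconds % 60}s"
--         elif seconds < 86400:
--             return f"{seconds // 3600}h {(seconds % 3600) // 60}m"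
--         else:
--             return f"{seconds // 86400}d {(seconds % 86400) // 3600}h"
--     except (ValueError, TypeError):
--         return str(uptime_value)
-- ===== SOURCE B (Python) =====
-- # Mixed-radix digit expansion (divmod cascade) + drop leading zeros + take two, instead of a threshold chain.
-- def _format_uptime(uptime_value) -> str:
--     """Format uptime in seconds to human readable format"""
--     if isinstance(uptime_value, str) and any(x in uptime_value for x in ['s', 'm', 'h', 'd']):
--         return uptime_value
--     try:
--         seconds = int(uptime_value)
--     except (ValueError, TypeError):
--         return str(uptime_value)
--     if seconds < 60:
--         return f"{seconds}s"
--     digits = []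
--     rem = seconds
--     for size in (86400, 3600, 60, 1):
--         digits.append(rem // size)
--         rem %= size
--     parts = list(zip(digits, 'dhms'))
--     while parts[0][0] == 0:
--         parts.pop(0)
--     return ' '.join(f"{v}{u}" for v, u in parts[:2])
-- ===== Notes on version B (the rewrite author's own statement) =====
-- stated objective: alternative
-- what changed: Replaces A's elif threshold chain by a mixed-radix divmod cascade that computes all four d/h/m/s digits, drops the leading zero digits and prints the first two remaining (value,unit) pairs joined with a space; the string-passthrough guard and int-parse fallback are kept.
import Mathlib
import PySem

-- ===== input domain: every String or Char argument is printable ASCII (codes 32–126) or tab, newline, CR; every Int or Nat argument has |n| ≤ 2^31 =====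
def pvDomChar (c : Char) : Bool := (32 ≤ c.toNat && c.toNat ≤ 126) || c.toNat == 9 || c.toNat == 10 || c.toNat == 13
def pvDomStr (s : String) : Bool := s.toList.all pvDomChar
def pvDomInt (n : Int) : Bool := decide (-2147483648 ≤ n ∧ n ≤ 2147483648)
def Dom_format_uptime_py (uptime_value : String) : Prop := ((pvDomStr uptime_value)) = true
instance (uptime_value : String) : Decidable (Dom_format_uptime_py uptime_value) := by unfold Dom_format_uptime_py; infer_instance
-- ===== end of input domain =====

-- B replaces A's threshold chain by a mixed-radix divmod cascade (digits for d/h/m/s), dropping leading zero digits and printing the first two; objective: alternative decomposition, same cost.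

-- ===== PORT A =====
def format_uptime_py (uptime_value : String) : String :=
  if ["s", "m", "h", "d"].any (fun x => PySem.Str.isIn x uptime_value) then
    uptime_value
  else
    match PySem.Int.ofStr? uptime_value with
    | none => uptime_value   -- except ValueError: return str(uptime_value)
    | some seconds =>
      if seconds < 60 then
        PySem.Int.toStr seconds ++ "s"
      else if seconds < 3600 then
        PySem.Int.toStr (PySem.Int.floordiv seconds 60) ++ "m" ++ " " ++ PySem.Int.toStr (PySem.Int.mod seconds 60) ++ "s"
      else if seconds < 86400 then
        PySem.Int.toStr (PySem.Int.floordiv seconds 3600) ++ "h" ++ " " ++ PySem.Int.toStr (PySem.Int.floordiv (PySem.Int.mod seconds 3600) 60) ++ "m"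
      else
        PySem.Int.toStr (PySem.Int.floordiv seconds 86400) ++ "d" ++ " " ++ PySem.Int.toStr (PySem.Int.floordiv (PySem.Int.mod seconds 86400) 3600) ++ "h"

-- ===== PORT B =====
-- the divmod cascade: 'for size in (86400,3600,60,1): digits.append(rem // size); rem %= size'
def pvDigits (rem : Int) : List Int → List Int
  | [] => []
  | size :: rest => PySem.Int.floordiv rem size :: pvDigits (PySem.Int.mod rem size) rest

def format_uptime_py_alt (uptime_value : String) : String :=
  if ["s", "m", "h", "d"].any (fun x => PySem.Str.isIn x uptime_value) then
    uptime_value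
  else
    match PySem.Int.ofStr? uptime_value with
    | none => uptime_value
    | some seconds =>
      if seconds < 60 then
        PySem.Int.toStr seconds ++ "s"
      else
        -- parts = list(zip(digits,'dhms')); while parts[0][0]==0: parts.pop(0)  (the 's' digit keeps parts nonempty, so the pop loop is List.dropWhile)
        let digits := pvDigits seconds [86400, 3600, 60, 1]
        let parts := (digits.zip "dhms".toList).dropWhile (fun p => p.1 == 0)
        PySem.Str.join " " ((parts.take 2).map (fun p => PySem.Int.toStr p.1 ++ String.singleton p.2))

-- ===== PRECONDITION & SPEC =====
def Spec_format_uptime_py (uptime_value : String) (out : String) : Prop := out = format_uptime_py_alt uptime_value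
instance (uptime_value : String) (out : String) : Decidable (Spec_format_uptime_py uptime_value out) := by unfold Spec_format_uptime_py; infer_instance

-- ===== CLAIM (what is proved, stated in full; the proofs are below) =====
def Claim_equal_format_uptime_py : Prop := ∀ (uptime_value : String), Dom_format_uptime_py uptime_value → Spec_format_uptime_py uptime_value (format_uptime_py uptime_value)

-- ===== LEMMAS AND PROOFS =====
theorem pv_join_two (a b : Int) (c1 c2 : Char) :
  PySem.Int.toStr a ++ String.singleton c1 ++ " " ++ PySem.Int.toStr b ++ String.singleton c2 =
    String.ofList (PySem.Chars.join [' '] [PySem.Int.toChars a ++ [c1], PySem.Int.toChars b ++ [c2]]) := by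
  rw [← String.toList_inj]
  simp [PySem.Chars.join_cons_cons, PySem.Chars.join_singleton, PySem.Int.toStr]

theorem pv_ediv_one_le (a b : Int) (hb : 0 < b) (h : b ≤ a) : ¬ (a / b = 0) := by
  have : 1 ≤ a / b := by
    rw [Int.le_ediv_iff_mul_le hb]; omega
  omega

-- ===== VERDICT (by name: the statement is the Claim_ definition above) =====
theorem format_uptime_py_spec : Claim_equal_format_uptime_py := by
  intro s _
  unfold Spec_format_uptime_py format_uptime_py format_uptime_py_alt
  split
  · rfl
  · split
    · rfl
    · rename_i seconds _
      by_cases h1 : seconds < 60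
      · simp [h1]
      · by_cases h2 : seconds < 3600
        · have e1 : seconds / 86400 = 0 := Int.ediv_eq_zero_of_lt (by omega) (by omega)
          have e2 : seconds % 86400 = seconds := Int.emod_eq_of_lt (by omega) (by omega)
          have e3 : seconds / 3600 = 0 := Int.ediv_eq_zero_of_lt (by omega) (by omega)
          have e4 : seconds % 3600 = seconds := Int.emod_eq_of_lt (by omega) (by omega)
          simp [h1, h2, pvDigits, e1, e2, e3, e4,
                pv_ediv_one_le seconds 60 (by omega) (by omega), PySem.Str.join]
          exact pv_join_two (seconds / 60) (seconds % 60) 'm' 's' 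
        · by_cases h3 : seconds < 86400
          · have e1 : seconds / 86400 = 0 := Int.ediv_eq_zero_of_lt (by omega) (by omega)
            have e2 : seconds % 86400 = seconds := Int.emod_eq_of_lt (by omega) (by omega)
            simp [h1, h2, h3, pvDigits, e1, e2,
                  pv_ediv_one_le seconds 3600 (by omega) (by omega), PySem.Str.join]
            exact pv_join_two (seconds / 3600) (seconds % 3600 / 60) 'h' 'm' 
          · simp [h1, h2, h3, pvDigits,
                  pv_ediv_one_le seconds 86400 (by omega) (by omega), PySem.Str.join]
            exact pv_join_two (seconds / 86400) (seconds % 86400 / 3600) 'd' 'h'
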